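-- pv_equiv track=rewrite | github.com/RyanLucas3/An-Optimal-RuleFit-Algorithm | ORRFA.py | gen_subpaths
-- ===== SOURCE A (Python) =====
-- def gen_subpaths(paths):
--
--     sub_paths = []
--
--     for path in paths:
--
--         blank_path = ""
--         path_list = path.split("+")
--
--         for i in path_list:
--
--             path_to_append = blank_path + f"{i}"
--             blank_path += f"{i} + "
--
--             sub_paths.append(path_to_append)
--
--     return [i for i in sub_paths if i != '1']
-- ===== SOURCE B (Python) =====
-- def gen_subpaths(paths):
--     # One nested comprehension: each cumulative prefix is emitted directly as a
--     # join of a slice (no running accumulator), and the '1' filter is applied inline.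
--     return [
--         s
--         for path in paths
--         for parts in [path.split("+")]
--         for j in range(len(parts))
--         for s in [" + ".join(parts[: j + 1])]
--         if s != "1"
--     ]
-- ===== Notes on version B (the rewrite author's own statement) =====
-- stated objective: simpler
-- what changed: Replaces the running blank_path accumulator and the post-hoc filter pass with a single nested comprehension that emits each cumulative prefix directly as ' + '.join(parts[:j+1]) and filters '1' inline.
import Mathlib
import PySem

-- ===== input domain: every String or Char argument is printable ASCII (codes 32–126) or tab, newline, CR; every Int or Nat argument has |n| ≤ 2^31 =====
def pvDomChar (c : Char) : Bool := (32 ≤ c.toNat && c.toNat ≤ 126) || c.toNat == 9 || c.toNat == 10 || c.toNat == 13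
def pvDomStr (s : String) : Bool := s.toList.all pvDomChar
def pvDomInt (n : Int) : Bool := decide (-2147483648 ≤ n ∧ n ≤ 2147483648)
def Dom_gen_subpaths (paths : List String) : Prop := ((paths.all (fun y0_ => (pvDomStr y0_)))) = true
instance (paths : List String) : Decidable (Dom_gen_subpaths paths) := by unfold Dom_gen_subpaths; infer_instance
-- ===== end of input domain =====

-- B replaces A's running blank_path accumulator and post-hoc filter with a single
-- nested comprehension emitting each prefix as ' + '.join(parts[:j+1]), filtered inline (objective: simpler).

-- ===== PORT A =====
-- A's inner loop: state is (blank_path, sub_paths); strings handled as lists of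
-- code points (PySem.Chars level, exact), results stored as String.
def genSubLoopA : List (List Char) → List Char → List String → List String
  | [], _, acc => acc
  | i :: rest, blank, acc =>
      -- path_to_append = blank_path + f"{i}"; blank_path += f"{i} + "; sub_paths.append(...)
      genSubLoopA rest (blank ++ i ++ " + ".toList) (acc ++ [String.ofList (blank ++ i)])

def gen_subpaths (paths : List String) : List String :=
  (paths.foldl
      (fun sub_paths path =>
        -- path.split("+") with the non-empty separator "+" (exact: PySem.Chars.splitOn)
        genSubLoopA (PySem.Chars.splitOn path.toList ['+']) [] sub_paths)
      []).filter (fun i => i != "1")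

-- ===== PORT B =====
def gen_subpaths_alt (paths : List String) : List String :=
  paths.flatMap (fun path =>
    (((PySem.List.pyRange 0 ((PySem.Chars.splitOn path.toList ['+']).length : Int) 1).map
        (fun j => String.ofList
          (PySem.Chars.join " + ".toList
            (PySem.List.slice (PySem.Chars.splitOn path.toList ['+']) none (some (j + 1)))))).filter
      (fun s => s != "1")))

-- ===== PRECONDITION & SPEC =====
def Spec_gen_subpaths (paths : List String) (out : List String) : Prop := out = gen_subpaths_alt paths
instance (paths : List String) (out : List String) : Decidable (Spec_gen_subpaths paths out) := by unfold Spec_gen_subpaths; infer_instance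

-- ===== CLAIM (what is proved, stated in full; the proofs are below) =====
def Claim_equal_gen_subpaths : Prop := ∀ (paths : List String), Dom_gen_subpaths paths → Spec_gen_subpaths paths (gen_subpaths paths)

-- ===== LEMMAS AND PROOFS =====

-- join over a nonempty cons peels the head with one separator
lemma join_cons_of_ne_nil (sep i : List Char) (l : List (List Char)) (h : l ≠ []) :
    PySem.Chars.join sep (i :: l) = i ++ sep ++ PySem.Chars.join sep l := by
  cases l with
  | nil => exact absurd rfl h
  | cons q t => exact PySem.Chars.join_cons_cons sep i q t

-- A's inner loop emits exactly the joined prefixes of `parts`, each prefixed by `blank`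
lemma genSubLoopA_eq (parts : List (List Char)) (blank : List Char) (acc : List String) :
    genSubLoopA parts blank acc =
      acc ++ (List.range parts.length).map
        (fun k => String.ofList (blank ++ PySem.Chars.join " + ".toList (parts.take (k + 1)))) := by
  induction parts generalizing blank acc with
  | nil => simp [genSubLoopA]
  | cons i rest ih =>
      rw [genSubLoopA, ih]
      rw [List.length_cons, List.range_succ_eq_map, List.map_cons, List.map_map,
        List.append_assoc, List.singleton_append]
      congr 1
      congr 1
      · rw [List.take_succ_cons, List.take_zero, PySem.Chars.join_singleton]
      · apply List.map_congr_left
        intro k hk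
        have hk' : k < rest.length := List.mem_range.mp hk
        have hne : rest.take (k + 1) ≠ [] := by
          intro h
          have hl := congrArg List.length h
          rw [List.length_take] at hl
          simp only [List.length_nil] at hl
          omega
        simp only [Function.comp_apply, Nat.succ_eq_add_one, List.take_succ_cons]
        rw [join_cons_of_ne_nil _ _ _ hne]
        simp only [List.append_assoc]

-- B's per-path list, rewritten from pyRange/slice to range/take
lemma alt_per_path (parts : List (List Char)) :
    ((PySem.List.pyRange 0 (parts.length : Int) 1).map
        (fun j => String.ofList
          (PySem.Chars.join " + ".toList (PySem.List.slice parts none (some (j + 1)))))) =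
      (List.range parts.length).map
        (fun k => String.ofList (PySem.Chars.join " + ".toList (parts.take (k + 1)))) := by
  rw [PySem.List.pyRange_zero_nat, List.map_map]
  apply List.map_congr_left
  intro k _
  simp only [Function.comp_apply]
  have h1 : ((k : Int) + 1) = ((k + 1 : Nat) : Int) := by push_cast; ring
  rw [h1, PySem.List.slice_to_natCast]

-- ===== VERDICT (by name: the statement is the Claim_ definition above) =====
theorem gen_subpaths_spec : Claim_equal_gen_subpaths := by
  intro paths _
  unfold Spec_gen_subpaths gen_subpaths gen_subpaths_alt
  have hfun : (fun (sub_paths : List String) (path : String) =>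
        genSubLoopA (PySem.Chars.splitOn path.toList ['+']) [] sub_paths) =
      (fun acc path => acc ++ (List.range (PySem.Chars.splitOn path.toList ['+']).length).map
        (fun k => String.ofList
          (PySem.Chars.join " + ".toList ((PySem.Chars.splitOn path.toList ['+']).take (k + 1))))) := by
    funext acc path
    rw [genSubLoopA_eq]
    simp only [List.nil_append]
  rw [hfun, PySem.List.foldl_append_eq_flatMap, List.nil_append, List.filter_flatMap]
  apply List.flatMap_congr
  intro path _
  rw [alt_per_path]
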